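-- pv_equiv track=rewrite | github.com/JoaaoCunhaa/ml-mcp-ia-vendas | src/python/mcp_primeira_mao/services/mobiauto_proposal_service.py | _dealer_por_nome
-- ===== SOURCE A (Python) =====
-- def _dealer_por_nome(loja_nome: str, lojas: list) -> str | None:
--     """Depara nome da loja → dealerid (codigo_svm). Tenta exato, depois parcial."""
--     if not loja_nome or not lojas:
--         return None
--     busca = loja_nome.lower().strip()
--     for loja in lojas:
--         if loja["nome"].lower().strip() == busca:
--             return loja["codigo_svm"]
--     # Parcial (ex: "SN GO BURITI" contido em "SN GO BURITI PREMIUM")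
--     for loja in lojas:
--         if busca in loja["nome"].lower():
--             return loja["codigo_svm"]
--     return None
-- ===== SOURCE B (Python) =====
-- def _dealer_por_nome(loja_nome: str, lojas: list) -> str | None:
--     """Single pass: exact match returns at once; the first partially matching store is
--     remembered (the store itself, not its code) and its codigo_svm is read only at the end."""
--     if not loja_nome or not lojas:
--         return None
--     busca = loja_nome.lower().strip()
--     fallback = None
--     for loja in lojas:
--         nome_l = loja["nome"].lower()
--         if nome_l.strip() == busca:
--             return loja["codigo_svm"]
--         if fallback is None and busca in nome_l:
--             fallback = loja
--     return fallback["codigo_svm"] if fallback is not None else None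
-- ===== Notes on version B (the rewrite author's own statement) =====
-- stated objective: simpler
-- what changed: Replaces A's two sequential scans (exact pass, then partial pass) by a single loop that returns on an exact match and remembers the first partially matching store, reading its codigo_svm only after the loop.
import Mathlib
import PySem

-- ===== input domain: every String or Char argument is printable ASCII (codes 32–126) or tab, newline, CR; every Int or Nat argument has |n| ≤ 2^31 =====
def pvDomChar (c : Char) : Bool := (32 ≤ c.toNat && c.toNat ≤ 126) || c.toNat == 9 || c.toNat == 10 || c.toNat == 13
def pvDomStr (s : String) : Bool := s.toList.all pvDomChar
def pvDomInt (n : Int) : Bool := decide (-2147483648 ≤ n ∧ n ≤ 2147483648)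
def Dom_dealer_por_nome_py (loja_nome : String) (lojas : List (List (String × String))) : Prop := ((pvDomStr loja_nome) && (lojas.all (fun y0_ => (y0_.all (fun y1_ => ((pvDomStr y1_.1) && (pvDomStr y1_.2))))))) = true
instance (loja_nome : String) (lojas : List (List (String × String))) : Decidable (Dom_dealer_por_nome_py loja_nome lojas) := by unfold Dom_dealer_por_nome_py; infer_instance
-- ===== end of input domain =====

-- B replaces A's two sequential scans (exact, then partial) by one loop that returns on an
-- exact match and remembers the first partially matching store as a fallback: simpler, single pass.


-- ===== PORT A =====
-- first loop: exact match on stripped lowered name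
def pvA_exact (busca : String) : List (List (String × String)) → Option String
  | [] => none
  | loja :: rest =>
    if PySem.Str.strip (PySem.Str.lower ((PySem.Dict.mk loja).getD "nome" "")) == busca then
      some ((PySem.Dict.mk loja).getD "codigo_svm" "")
    else pvA_exact busca rest

-- second loop: substring match on lowered (unstripped) name
def pvA_partial (busca : String) : List (List (String × String)) → Option String
  | [] => none
  | loja :: rest =>
    if PySem.Str.isIn busca (PySem.Str.lower ((PySem.Dict.mk loja).getD "nome" "")) then
      some ((PySem.Dict.mk loja).getD "codigo_svm" "")
    else pvA_partial busca rest

def dealer_por_nome_py (loja_nome : String) (lojas : List (List (String × String))) : Option String :=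
  if loja_nome == "" || lojas.isEmpty then none
  else
    let busca := PySem.Str.strip (PySem.Str.lower loja_nome)
    match pvA_exact busca lojas with
    | some c => some c
    | none => pvA_partial busca lojas

-- ===== PORT B =====
-- single loop; `fb` holds the first partially matching STORE (not its code); after the loop
-- the fallback's codigo_svm is looked up ("fallback['codigo_svm'] if fallback is not None else None")
def pvB_scan (busca : String) (fb : Option (List (String × String))) :
    List (List (String × String)) → Option String
  | [] => fb.map (fun loja => (PySem.Dict.mk loja).getD "codigo_svm" "")
  | loja :: rest =>
    let nome_l := PySem.Str.lower ((PySem.Dict.mk loja).getD "nome" "")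
    if PySem.Str.strip nome_l == busca then some ((PySem.Dict.mk loja).getD "codigo_svm" "")
    else match fb with
      | some f => pvB_scan busca (some f) rest
      | none => pvB_scan busca (if PySem.Str.isIn busca nome_l then some loja else none) rest

def dealer_por_nome_py_alt (loja_nome : String) (lojas : List (List (String × String))) : Option String :=
  if loja_nome == "" || lojas.isEmpty then none
  else pvB_scan (PySem.Str.strip (PySem.Str.lower loja_nome)) none lojas

-- ===== PRECONDITION & SPEC =====
-- Pre_ holds exactly when Python A returns normally: it excludes exactly the inputs on which
-- A raises KeyError (a missing "nome" key reached by the scan, or a missing "codigo_svm" on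
-- the store whose code would be returned).
def Pre_dealer_por_nome_py (loja_nome : String) (lojas : List (List (String × String))) : Prop :=
  loja_nome = "" ∨ lojas = [] ∨
    (let busca := PySem.Str.strip (PySem.Str.lower loja_nome)
     let hasN := fun (l : List (String × String)) => (PySem.Dict.mk l).contains "nome"
     let isEx := fun (l : List (String × String)) =>
       PySem.Str.strip (PySem.Str.lower ((PySem.Dict.mk l).getD "nome" "")) == busca
     let isPa := fun (l : List (String × String)) =>
       PySem.Str.isIn busca (PySem.Str.lower ((PySem.Dict.mk l).getD "nome" ""))
     let hasC := fun (l : List (String × String)) => (PySem.Dict.mk l).contains "codigo_svm"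
     (∃ i < lojas.length, (∀ j ≤ i, hasN (lojas.getD j []) = true) ∧
        isEx (lojas.getD i []) = true ∧ (∀ j < i, isEx (lojas.getD j []) = false) ∧
        hasC (lojas.getD i []) = true) ∨
     ((∀ l ∈ lojas, hasN l = true ∧ isEx l = false) ∧
      (∀ i < lojas.length,
        (isPa (lojas.getD i []) = true ∧ ∀ j < i, isPa (lojas.getD j []) = false) →
        hasC (lojas.getD i []) = true)))
instance (loja_nome : String) (lojas : List (List (String × String))) : Decidable (Pre_dealer_por_nome_py loja_nome lojas) := by unfold Pre_dealer_por_nome_py; infer_instance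

def pvWitness_dealer_por_nome_py : String × (List (List (String × String))) :=
  ("Loja A", [[("nome", "loja a premium"), ("codigo_svm", "77")], [("nome", "outra"), ("codigo_svm", "88")]])

def Spec_dealer_por_nome_py (loja_nome : String) (lojas : List (List (String × String))) (out : Option String) : Prop := out = dealer_por_nome_py_alt loja_nome lojas
instance (loja_nome : String) (lojas : List (List (String × String))) (out : Option String) : Decidable (Spec_dealer_por_nome_py loja_nome lojas out) := by unfold Spec_dealer_por_nome_py; infer_instance

-- ===== CLAIM (what is proved, stated in full; the proofs are below) =====
def Claim_equal_dealer_por_nome_py : Prop := ∀ (loja_nome : String) (lojas : List (List (String × String))), Dom_dealer_por_nome_py loja_nome lojas → Pre_dealer_por_nome_py loja_nome lojas → Spec_dealer_por_nome_py loja_nome lojas (dealer_por_nome_py loja_nome lojas)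

-- ===== LEMMAS AND PROOFS =====
-- Loop invariant: B's single scan equals A's exact scan, falling back to the recorded store's
-- code, falling back to A's partial scan.
theorem pvB_scan_eq (busca : String) (lojas : List (List (String × String)))
    (fb : Option (List (String × String))) :
    pvB_scan busca fb lojas =
      match pvA_exact busca lojas with
      | some c => some c
      | none => match fb with
        | some f => some ((PySem.Dict.mk f).getD "codigo_svm" "")
        | none => pvA_partial busca lojas := by
  induction lojas generalizing fb with
  | nil => cases fb <;> rfl
  | cons loja rest ih =>
    simp only [pvB_scan, pvA_exact, pvA_partial]
    by_cases hex : PySem.Str.strip (PySem.Str.lower ((PySem.Dict.mk loja).getD "nome" "")) == busca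
    · simp [hex]
    · simp only [hex]
      cases fb with
      | some f => exact (ih (some f)).trans (by cases pvA_exact busca rest <;> rfl)
      | none =>
        refine (ih _).trans ?_
        cases pvA_exact busca rest <;> split_ifs <;> simp_all

-- ===== VERDICT (by name: the statement is the Claim_ definition above) =====
theorem dealer_por_nome_py_spec : Claim_equal_dealer_por_nome_py := by
  intro loja_nome lojas _ _
  unfold Spec_dealer_por_nome_py dealer_por_nome_py dealer_por_nome_py_alt
  by_cases hg : (loja_nome == "" || lojas.isEmpty) = true
  · simp [hg]
  · simp only [hg, Bool.false_eq_true, not_false_eq_true, if_neg]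
    rw [pvB_scan_eq]
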